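-- pv_equiv track=rewrite | github.com/robertirm/faculty-stuff | fundamentals-of-programming/Lab3/lab3.py | cifrecomune
-- ===== SOURCE A (Python) =====
-- def cifrecomune(n1,n2):
--     # functia afla daca doua nr au cel putin doua cifre comune
--     # date de intrare : n1,n2-nr naturale
--     # date de iesire : True, daca numerele au prop ceruta si False , in caz contrar
--     cfc = 0
--     cif1 = [0,0,0,0,0,0,0,0,0,0]
--     cif2 = [0,0,0,0,0,0,0,0,0,0]
--
--     if n1<0:
--         n1 = n1 *(-1)
--     if n2 <0:
--         n2 = n2 * (-1)
--
--     while n1: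
--         ultima_cifra = int(n1 % 10)
--         cif1[ ultima_cifra ] += 1
--         n1 //= 10
--     while n2:
--         ultima_cifra = int(n2 % 10)
--         cif2[ ultima_cifra ] += 1
--         n2 //= 10
--     for i in range(0,10):
--         if cif1[i]!=0 and cif2[i]!=0:
--             cfc =cfc +1
--
--     if cfc >= 2:
--         return True
--     else:
--         return False
-- ===== SOURCE B (Python) =====
-- def cifrecomune(n1, n2):
--     # True iff the two numbers share at least two distinct digit values.
--     # Inverted strategy: no digit histogram/collection at all; for each
--     # candidate digit value 0..9 test directly whether it occurs in both
--     # numbers, and stop as soon as a second common digit is found.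
--     def has_digit(n, d):
--         n = abs(n)
--         while n:
--             if n % 10 == d:
--                 return True
--             n //= 10
--         return False
--     common = 0
--     for d in range(10):
--         if has_digit(n1, d) and has_digit(n2, d):
--             common += 1
--             if common == 2:
--                 return True
--     return False
-- ===== Notes on version B (the rewrite author's own statement) =====
-- stated objective: alternative
-- what changed: B builds no per-number digit data at all: instead of A's two length-10 count-array passes followed by a range(10) comparison loop, B searches over candidate digit values 0..9, testing each for membership in both numbers with a direct scan and returning early at the second common digit.
import Mathlib
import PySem

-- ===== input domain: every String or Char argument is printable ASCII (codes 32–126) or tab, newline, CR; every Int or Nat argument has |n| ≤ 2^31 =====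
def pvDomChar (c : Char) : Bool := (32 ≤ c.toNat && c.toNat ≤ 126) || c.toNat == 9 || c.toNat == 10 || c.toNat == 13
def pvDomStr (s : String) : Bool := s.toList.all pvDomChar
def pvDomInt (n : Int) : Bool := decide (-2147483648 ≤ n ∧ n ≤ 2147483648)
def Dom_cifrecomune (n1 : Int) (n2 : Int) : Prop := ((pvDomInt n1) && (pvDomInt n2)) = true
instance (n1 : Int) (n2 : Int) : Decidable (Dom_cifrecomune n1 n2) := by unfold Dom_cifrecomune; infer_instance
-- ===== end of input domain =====

-- B inverts A's structure: instead of two length-10 digit-count arrays compared by a range(10)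
-- loop, B scans candidate digit values 0..9, testing each for membership in both numbers with a
-- direct digit scan and returning early at the second common digit (alternative, same cost).


-- ===== PORT A =====
-- A's digit-count loop: 'while n: u = int(n % 10); cif[u] += 1; n //= 10'.
-- A runs it only after making n nonnegative, so the 'n ≤ 0' totality guard agrees with
-- Python's 'while n:' on every reachable state; the index u lies in [0,10), so pySetD/pyGetD are exact.
def pvDigLoopA (n : Int) (cif : List Int) : List Int :=
  if n ≤ 0 then cif
  else pvDigLoopA (PySem.Int.floordiv n 10)
        (PySem.List.pySetD cif (PySem.Int.mod n 10)
          (PySem.List.pyGetD cif (PySem.Int.mod n 10) 0 + 1))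
termination_by n.toNat
decreasing_by
  rw [PySem.Int.floordiv_eq_ediv_of_pos (by norm_num)]
  omega

def cifrecomune (n1 : Int) (n2 : Int) : Bool :=
  let cif1 : List Int := [0,0,0,0,0,0,0,0,0,0]
  let cif2 : List Int := [0,0,0,0,0,0,0,0,0,0]
  let n1 := if n1 < 0 then n1 * (-1) else n1
  let n2 := if n2 < 0 then n2 * (-1) else n2
  let cif1 := pvDigLoopA n1 cif1
  let cif2 := pvDigLoopA n2 cif2
  let cfc : Int := (PySem.List.pyRange 0 10 1).foldl
    (fun cfc i =>
      if PySem.List.pyGetD cif1 i 0 ≠ 0 ∧ PySem.List.pyGetD cif2 i 0 ≠ 0 then cfc + 1 else cfc) 0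
  if cfc ≥ 2 then true else false

-- ===== PORT B =====
-- B's membership scan: 'n = abs(n); while n: if n % 10 == d: return True; n //= 10; return False'.
-- The loop runs on n = abs(original) ≥ 0, so the 'n ≤ 0' totality guard agrees with 'while n:'.
def pvHasDigitGo (n : Int) (d : Int) : Bool :=
  if n ≤ 0 then false
  else if PySem.Int.mod n 10 == d then true
  else pvHasDigitGo (PySem.Int.floordiv n 10) d
termination_by n.toNat
decreasing_by
  rw [PySem.Int.floordiv_eq_ediv_of_pos (by norm_num)]
  omega

def pvHasDigit (n : Int) (d : Int) : Bool := pvHasDigitGo |n| d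

-- B's 'for d in range(10)' loop with the early 'return True' at the second hit.
def pvScanB (n1 : Int) (n2 : Int) (ds : List Int) (common : Int) : Bool :=
  match ds with
  | [] => false
  | d :: rest =>
    if pvHasDigit n1 d && pvHasDigit n2 d then
      if common + 1 == 2 then true else pvScanB n1 n2 rest (common + 1)
    else pvScanB n1 n2 rest common

def cifrecomune_alt (n1 : Int) (n2 : Int) : Bool :=
  pvScanB n1 n2 (PySem.List.pyRange 0 10 1) 0

-- ===== PRECONDITION & SPEC =====
def Spec_cifrecomune (n1 : Int) (n2 : Int) (out : Bool) : Prop := out = cifrecomune_alt n1 n2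
instance (n1 : Int) (n2 : Int) (out : Bool) : Decidable (Spec_cifrecomune n1 n2 out) := by unfold Spec_cifrecomune; infer_instance

-- ===== CLAIM (what is proved, stated in full; the proofs are below) =====
def Claim_equal_cifrecomune : Prop := ∀ (n1 : Int) (n2 : Int), Dom_cifrecomune n1 n2 → Spec_cifrecomune n1 n2 (cifrecomune n1 n2)

-- ===== LEMMAS AND PROOFS =====

-- A's count array vs B's membership scan: after A's loop on n, index i has a nonzero count
-- iff B's scan of n finds digit i or the count was already nonzero; counts stay nonnegative.
theorem pvLoopA_char (n : Int) (cif : List Int) (hlen : cif.length = 10)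
    (hnn : ∀ i : Nat, i < 10 → 0 ≤ PySem.List.pyGetD cif (i : Int) 0) :
    (pvDigLoopA n cif).length = 10 ∧
    (∀ i : Nat, i < 10 → 0 ≤ PySem.List.pyGetD (pvDigLoopA n cif) (i : Int) 0) ∧
    (∀ i : Nat, i < 10 →
      (PySem.List.pyGetD (pvDigLoopA n cif) (i : Int) 0 ≠ 0 ↔
        (pvHasDigitGo n (i : Int) = true ∨ PySem.List.pyGetD cif (i : Int) 0 ≠ 0))) := by
  induction n, cif using pvDigLoopA.induct with
  | case1 n cif hn =>
    rw [pvDigLoopA, if_pos hn]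
    refine ⟨hlen, hnn, ?_⟩
    intro i hi
    rw [pvHasDigitGo, if_pos hn]
    simp
  | case2 n cif hn ih =>
    rw [pvDigLoopA, if_neg hn]
    set u := PySem.Int.mod n 10 with hu
    have hu0 : 0 ≤ u := PySem.Int.mod_nonneg n (by norm_num)
    have hu10 : u < 10 := PySem.Int.mod_lt n (by norm_num)
    have hcast : u = ((u.toNat : Nat) : Int) := (Int.toNat_of_nonneg hu0).symm
    have hult : u.toNat < cif.length := by omega
    have hget : ∀ i : Nat, i < 10 →
        PySem.List.pyGetD (PySem.List.pySetD cif u (PySem.List.pyGetD cif u 0 + 1)) (i : Int) 0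
          = if i = u.toNat then PySem.List.pyGetD cif u 0 + 1 else PySem.List.pyGetD cif (i : Int) 0 := by
      intro i hi
      rw [hcast]
      exact PySem.List.pyGetD_pySetD_natCast cif u.toNat i _ 0 hult
    have hnn' : ∀ i : Nat, i < 10 →
        0 ≤ PySem.List.pyGetD (PySem.List.pySetD cif u (PySem.List.pyGetD cif u 0 + 1)) (i : Int) 0 := by
      intro i hi
      rw [hget i hi]
      have h1 := hnn i hi
      have h2 := hnn u.toNat (by omega)
      rw [← hcast] at h2
      split_ifs <;> omega
    obtain ⟨ihlen, ihnn, ihchar⟩ := ih (by rw [PySem.List.length_pySetD]; exact hlen) hnn'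
    refine ⟨ihlen, ihnn, ?_⟩
    intro i hi
    have hstep : pvHasDigitGo n (i : Int)
        = if (PySem.Int.mod n 10 == (i : Int)) then true
          else pvHasDigitGo (PySem.Int.floordiv n 10) (i : Int) := by
      conv_lhs => rw [pvHasDigitGo]
      rw [if_neg hn]
    rw [ihchar i hi, hget i hi, hstep]
    by_cases hiu : i = u.toNat
    · have heq : (PySem.Int.mod n 10 == (i : Int)) = true := by
        rw [← hu]
        simp only [beq_iff_eq]
        rw [hiu, ← hcast]
      rw [if_pos heq, if_pos hiu]
      have h2 := hnn u.toNat (by omega)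
      rw [← hcast] at h2
      constructor
      · intro _; exact Or.inl rfl
      · intro _; exact Or.inr (by omega)
    · have hne : (PySem.Int.mod n 10 == (i : Int)) = false := by
        rw [← hu]
        simp only [beq_eq_false_iff_ne, ne_eq]
        intro h
        exact hiu (by omega)
      simp only [hne, Bool.false_eq_true, if_false, if_neg hiu]

theorem pvScanB_spec (n1 n2 : Int) (ds : List Int) (common : Int)
    (h0 : 0 ≤ common) (h2 : common < 2) :
    pvScanB n1 n2 ds common
      = decide (2 ≤ common + (ds.countP (fun d => pvHasDigit n1 d && pvHasDigit n2 d) : Int)) := by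
  induction ds generalizing common with
  | nil =>
    simp only [pvScanB, List.countP_nil, Nat.cast_zero, add_zero]
    symm
    rw [decide_eq_false_iff_not]
    omega
  | cons d rest ih =>
    rw [pvScanB]
    by_cases hd : (pvHasDigit n1 d && pvHasDigit n2 d) = true
    · rw [if_pos hd, List.countP_cons, hd]
      simp only [if_true]
      by_cases hc : common + 1 == 2
      · have hc' : common = 1 := by
          have := beq_iff_eq.mp hc; omega
        rw [if_pos hc]
        symm
        rw [decide_eq_true_iff]
        push_cast
        omega
      · have hc' : common + 1 ≠ 2 := by simpa using hc
        rw [if_neg (by simpa using hc')]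
        rw [ih (common + 1) (by omega) (by omega)]
        congr 1
        rw [eq_iff_iff]
        push_cast
        constructor <;> intro <;> omega
    · rw [if_neg hd, List.countP_cons]
      simp only [Bool.not_eq_true] at hd
      rw [hd]
      simp only [Bool.false_eq_true, if_false, add_zero]
      exact ih common h0 h2

theorem pv_main (n1 n2 : Int) : cifrecomune n1 n2 = cifrecomune_alt n1 n2 := by
  unfold cifrecomune cifrecomune_alt
  have habs : ∀ m : Int, (if m < 0 then m * (-1) else m) = |m| := by
    intro m
    split_ifs with h
    · rw [abs_of_neg h]; ring
    · rw [abs_of_nonneg (not_lt.mp h)]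
  dsimp only
  rw [habs n1, habs n2]
  have hinit : ∀ i : Nat, i < 10 → 0 ≤ PySem.List.pyGetD ([0,0,0,0,0,0,0,0,0,0] : List Int) (i : Int) 0 := by
    intro i hi
    interval_cases i <;> simp [PySem.List.pyGetD]
  have hzero : ∀ i : Nat, i < 10 → PySem.List.pyGetD ([0,0,0,0,0,0,0,0,0,0] : List Int) (i : Int) 0 = 0 := by
    intro i hi
    interval_cases i <;> simp [PySem.List.pyGetD]
  obtain ⟨_, _, hchar1⟩ := pvLoopA_char |n1| [0,0,0,0,0,0,0,0,0,0] rfl hinit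
  obtain ⟨_, _, hchar2⟩ := pvLoopA_char |n2| [0,0,0,0,0,0,0,0,0,0] rfl hinit
  set cif1 := pvDigLoopA |n1| [0,0,0,0,0,0,0,0,0,0] with hc1
  set cif2 := pvDigLoopA |n2| [0,0,0,0,0,0,0,0,0,0] with hc2
  rw [PySem.List.foldl_ite_add_one
    (p := fun i => PySem.List.pyGetD cif1 i 0 ≠ 0 ∧ PySem.List.pyGetD cif2 i 0 ≠ 0)]
  rw [pvScanB_spec n1 n2 _ 0 (by omega) (by omega)]
  have hcongr : (PySem.List.pyRange 0 10 1).countP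
        (fun x => decide (PySem.List.pyGetD cif1 x 0 ≠ 0 ∧ PySem.List.pyGetD cif2 x 0 ≠ 0))
      = (PySem.List.pyRange 0 10 1).countP (fun d => pvHasDigit n1 d && pvHasDigit n2 d) := by
    apply List.countP_congr
    intro x hx
    obtain ⟨hx0, hx10⟩ := PySem.List.mem_pyRange_one.mp hx
    have hxc : x = ((x.toNat : Nat) : Int) := (Int.toNat_of_nonneg hx0).symm
    have h1 := hchar1 x.toNat (by omega)
    have h2 := hchar2 x.toNat (by omega)
    rw [← hxc] at h1 h2
    simp only [decide_eq_true_eq, Bool.and_eq_true, pvHasDigit]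
    have hz : PySem.List.pyGetD ([0,0,0,0,0,0,0,0,0,0] : List Int) x 0 = 0 := by
      rw [hxc]; exact hzero x.toNat (by omega)
    constructor
    · rintro ⟨ha, hb⟩
      refine ⟨?_, ?_⟩
      · rcases h1.mp ha with h | h
        · exact h
        · exact absurd hz h
      · rcases h2.mp hb with h | h
        · exact h
        · exact absurd hz h
    · rintro ⟨ha, hb⟩
      exact ⟨h1.mpr (Or.inl ha), h2.mpr (Or.inl hb)⟩
  rw [hcongr]
  by_cases h : (0 : Int) + ((PySem.List.pyRange 0 10 1).countP (fun d => pvHasDigit n1 d && pvHasDigit n2 d) : Int) ≥ 2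
  · rw [if_pos h]
    simp only [zero_add] at h ⊢
    simp [h]
  · rw [if_neg h]
    simp only [zero_add] at h ⊢
    simp [h]

-- ===== VERDICT (by name: the statement is the Claim_ definition above) =====
theorem cifrecomune_spec : Claim_equal_cifrecomune := by
  intro n1 n2 _
  unfold Spec_cifrecomune
  exact pv_main n1 n2
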